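-- pv_equiv track=rewrite | github.com/wrshoemaker/I529-Group-Projects | Project2/Python/PredProStr_ghmm.py | generate_length
-- ===== SOURCE A (Python) =====
-- from itertools import groupby
--
-- def generate_length(feature_set):
-- 	h_length={}#key is length, value is frequency
-- 	e_length={}
-- 	c_length={}
-- 	for sequence in feature_set:
-- 		tmp=[''.join(g) for k,g in groupby(sequence)] #parse the feature sequence into tmp=['mmm','iii','oooo'..]
-- 		for each in tmp:
-- 			if 'h' in each.lower():#the membrane segment
-- 				if len(each) not in h_length.keys():
-- 					h_length[len(each)] = 1
-- 				else:
-- 					h_length[len(each)] += 1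
-- 			elif 'e' in each.lower():#inside segment
-- 				if len(each) not in e_length.keys():
-- 					e_length[len(each)] = 1
-- 				else:
-- 					e_length[len(each)] += 1
-- 			elif '_' in each.lower():#outside segment
-- 				if len(each) not in c_length.keys():
-- 					c_length[len(each)] = 1
-- 				else:
-- 					c_length[len(each)] += 1
-- 	#return three dictionaries
-- 	return h_length,e_length,c_length
-- ===== SOURCE B (Python) =====
-- def _runs(s):
--     # run-length decomposition via repeated lstrip of the leading character
--     out = []
--     while s:
--         head = s[0]
--         rest = s.lstrip(head)
--         out.append((head, len(s) - len(rest)))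
--         s = rest
--     return out
--
-- def _tally(events, cls):
--     d = {}
--     for c, n in events:
--         if c == cls:
--             d[n] = d.get(n, 0) + 1
--     return d
--
-- def generate_length(feature_set):
--     events = [(ch.lower(), n) for s in feature_set for ch, n in _runs(s)]
--     return _tally(events, 'h'), _tally(events, 'e'), _tally(events, '_')
-- ===== Notes on version B (the rewrite author's own statement) =====
-- stated objective: alternative
-- what changed: Replaces A's single interleaved pass (groupby run strings classified into three dicts updated in place) by a staged pipeline: first flatten all sequences into one list of (lowercased run character, run length) events via repeated lstrip, then build each of the three dicts by an independent filtered tally pass over that event list.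
import Mathlib
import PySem

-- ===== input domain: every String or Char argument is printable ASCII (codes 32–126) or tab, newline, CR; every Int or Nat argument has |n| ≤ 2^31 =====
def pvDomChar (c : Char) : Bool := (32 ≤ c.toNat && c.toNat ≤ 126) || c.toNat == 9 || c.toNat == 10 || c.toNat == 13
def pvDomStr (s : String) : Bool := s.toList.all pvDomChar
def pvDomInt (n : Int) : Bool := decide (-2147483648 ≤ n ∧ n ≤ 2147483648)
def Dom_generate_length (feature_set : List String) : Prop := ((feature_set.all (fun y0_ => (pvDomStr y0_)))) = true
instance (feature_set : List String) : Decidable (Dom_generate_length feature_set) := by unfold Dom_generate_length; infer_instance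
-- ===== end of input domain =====

-- B restructures A's single interleaved pass into a staged pipeline: a flat event list of
-- (lowercased run char, run length) pairs, then three independent filtered tallies (alternative).

-- ===== PORT A =====

-- itertools.groupby over the characters of a string: the list of maximal runs, in order
def pvRuns : List Char → List (List Char)
  | [] => []
  | c :: cs =>
    (c :: cs.takeWhile (· == c)) :: pvRuns (cs.dropWhile (· == c))
  termination_by l => l.length
  decreasing_by
    simp only [List.length_cons]
    exact Nat.lt_succ_of_le (List.length_dropWhile_le _ _)

-- if len(each) not in d.keys(): d[len] = 1 else: d[len] += 1
def pvBumpA (d : PySem.Dict Int Int) (k : Int) : PySem.Dict Int Int :=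
  if !(d.contains k) then d.insert k 1 else d.insert k (d.getD k 0 + 1)

-- one iteration of A's inner loop over tmp ('h' in each.lower() for a one-char needle is
-- exactly char membership in the lowered run, ported as such)
def pvClassifyA :
    (PySem.Dict Int Int × PySem.Dict Int Int × PySem.Dict Int Int) → List Char →
      PySem.Dict Int Int × PySem.Dict Int Int × PySem.Dict Int Int
  | (h, e, c), each =>
    let k : Int := (each.length : Int)
    if 'h' ∈ PySem.Chars.lower each then (pvBumpA h k, e, c)
    else if 'e' ∈ PySem.Chars.lower each then (h, pvBumpA e k, c)
    else if '_' ∈ PySem.Chars.lower each then (h, e, pvBumpA c k)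
    else (h, e, c)

-- A's body for one sequence: tmp = runs, then the inner loop
def pvSeqA (st : PySem.Dict Int Int × PySem.Dict Int Int × PySem.Dict Int Int) (s : String) :
    PySem.Dict Int Int × PySem.Dict Int Int × PySem.Dict Int Int :=
  (pvRuns s.toList).foldl pvClassifyA st

def generate_length (feature_set : List String) : (List (Int × Int)) × (List (Int × Int)) × (List (Int × Int)) :=
  match feature_set.foldl pvSeqA (PySem.Dict.empty, PySem.Dict.empty, PySem.Dict.empty) with
  | (h, e, c) => (h.items, e.items, c.items)

-- ===== PORT B =====

-- _runs(s): repeated lstrip of the leading character; run length = len(s) - len(rest)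
def pvRunsB : List Char → List (Char × Int)
  | [] => []
  | c :: cs =>
    let rest := (c :: cs).dropWhile (· == c)
    (c, ((c :: cs).length : Int) - (rest.length : Int)) :: pvRunsB rest
  termination_by l => l.length
  decreasing_by
    simp only [List.dropWhile_cons, beq_self_eq_true, if_true, List.length_cons]
    exact Nat.lt_succ_of_le (List.length_dropWhile_le _ _)

-- _tally's loop body: if c == cls: d[n] = d.get(n, 0) + 1
def pvStepB (cls : Char) (d : PySem.Dict Int Int) (p : Char × Int) : PySem.Dict Int Int :=
  if p.1 = cls then d.insert p.2 (d.getD p.2 0 + 1) else d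

-- _tally(events, cls)
def pvTallyB (events : List (Char × Int)) (cls : Char) : PySem.Dict Int Int :=
  events.foldl (pvStepB cls) PySem.Dict.empty

def generate_length_alt (feature_set : List String) : (List (Int × Int)) × (List (Int × Int)) × (List (Int × Int)) :=
  let events := feature_set.flatMap
    (fun s => (pvRunsB s.toList).map (fun p => (PySem.Chars.lowerChar p.1, p.2)))
  ((pvTallyB events 'h').items, (pvTallyB events 'e').items, (pvTallyB events '_').items)

-- ===== PRECONDITION & SPEC =====
def Spec_generate_length (feature_set : List String) (out : (List (Int × Int)) × (List (Int × Int)) × (List (Int × Int))) : Prop := out = generate_length_alt feature_set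
instance (feature_set : List String) (out : (List (Int × Int)) × (List (Int × Int)) × (List (Int × Int))) : Decidable (Spec_generate_length feature_set out) := by unfold Spec_generate_length; infer_instance

-- ===== CLAIM (what is proved, stated in full; the proofs are below) =====
def Claim_equal_generate_length : Prop := ∀ (feature_set : List String), Dom_generate_length feature_set → Spec_generate_length feature_set (generate_length feature_set)

-- ===== LEMMAS AND PROOFS =====

-- the event stream of one sequence, seen from A's side
def pvEvs (l : List Char) : List (Char × Int) :=
  (pvRuns l).map (fun r => (PySem.Chars.lowerChar r.headI, (r.length : Int)))

theorem pvBumpA_eq (d : PySem.Dict Int Int) (k : Int) :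
    pvBumpA d k = d.insert k (d.getD k 0 + 1) := by
  unfold pvBumpA
  by_cases h : d.contains k = true
  · simp [h]
  · have h' : d.contains k = false := by simpa using h
    have hg : d.getD k 0 = 0 := PySem.Dict.getD_of_not_contains _ _ h'
    simp [h', hg]

-- A's classification of one constant run decomposes into three independent tally steps
theorem pvClassifyA_run (st : PySem.Dict Int Int × PySem.Dict Int Int × PySem.Dict Int Int)
    (c : Char) (t : List Char) (ht : ∀ x ∈ t, x = c) :
    pvClassifyA st (c :: t) =
      (pvStepB 'h' st.1 (PySem.Chars.lowerChar c, ((c :: t).length : Int)),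
       pvStepB 'e' st.2.1 (PySem.Chars.lowerChar c, ((c :: t).length : Int)),
       pvStepB '_' st.2.2 (PySem.Chars.lowerChar c, ((c :: t).length : Int))) := by
  obtain ⟨h, e, cc⟩ := st
  have hmem : ∀ a : Char, (a ∈ PySem.Chars.lower (c :: t)) ↔ PySem.Chars.lowerChar c = a := by
    intro a
    simp only [PySem.Chars.lower, List.mem_map, List.mem_cons]
    constructor
    · rintro ⟨x, hx | hx, rfl⟩
      · rw [hx]
      · rw [ht x hx]
    · intro ha; exact ⟨c, Or.inl rfl, ha⟩
  simp only [pvClassifyA, pvStepB, hmem, pvBumpA_eq]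
  by_cases h1 : PySem.Chars.lowerChar c = 'h'
  · simp [h1]
  · by_cases h2 : PySem.Chars.lowerChar c = 'e'
    · simp [h2]
    · by_cases h3 : PySem.Chars.lowerChar c = '_'
      · simp [h3]
      · simp [h1, h2, h3]

-- every run produced by pvRuns is a nonempty constant run
theorem pvRuns_const (l : List Char) :
    ∀ r ∈ pvRuns l, ∃ c t, r = c :: t ∧ ∀ x ∈ t, x = c := by
  induction l using pvRuns.induct with
  | case1 => intro r hr; simp [pvRuns] at hr
  | case2 c cs ih =>
    intro r hr
    rw [pvRuns] at hr
    rcases List.mem_cons.mp hr with h | h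
    · refine ⟨c, cs.takeWhile (· == c), h, fun x hx => ?_⟩
      have hb := List.mem_takeWhile_imp hx
      exact eq_of_beq hb
    · exact ih r h

-- A's fold over a list of constant runs = the three componentwise tally folds
theorem pvFoldA_ev (runs : List (List Char))
    (hc : ∀ r ∈ runs, ∃ c t, r = c :: t ∧ ∀ x ∈ t, x = c)
    (st : PySem.Dict Int Int × PySem.Dict Int Int × PySem.Dict Int Int) :
    runs.foldl pvClassifyA st =
      ((runs.map (fun r => (PySem.Chars.lowerChar r.headI, (r.length : Int)))).foldl (pvStepB 'h') st.1,
       (runs.map (fun r => (PySem.Chars.lowerChar r.headI, (r.length : Int)))).foldl (pvStepB 'e') st.2.1,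
       (runs.map (fun r => (PySem.Chars.lowerChar r.headI, (r.length : Int)))).foldl (pvStepB '_') st.2.2) := by
  induction runs generalizing st with
  | nil => simp
  | cons r rs ih =>
    obtain ⟨c, t, rfl, ht⟩ := hc r (List.mem_cons_self)
    simp only [List.foldl_cons, List.map_cons]
    rw [pvClassifyA_run st c t ht, ih (fun r hr => hc r (List.mem_cons_of_mem _ hr))]
    simp [List.headI]

-- B's run extraction agrees with A's group decomposition up to the event view
theorem pvRunsB_eq (l : List Char) :
    pvRunsB l = (pvRuns l).map (fun r => (r.headI, (r.length : Int))) := by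
  induction l using pvRuns.induct with
  | case1 => simp [pvRunsB, pvRuns]
  | case2 c cs ih =>
    rw [pvRunsB, pvRuns]
    simp only [List.map_cons, List.dropWhile_cons, beq_self_eq_true, if_true, List.headI]
    have hlen := congrArg List.length (List.takeWhile_append_dropWhile (p := (· == c)) (l := cs))
    simp only [List.length_append] at hlen
    have harith : (((c :: cs).length : Int)) - ((cs.dropWhile (· == c)).length : Int)
        = (((c :: cs.takeWhile (· == c)).length : Int)) := by
      simp only [List.length_cons]
      omega
    rw [harith, ih]
    rfl

-- the global event list built by B equals the concatenation of A's per-sequence events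
theorem pvEvents_eq (feature_set : List String) :
    feature_set.flatMap
        (fun s => (pvRunsB s.toList).map (fun p => (PySem.Chars.lowerChar p.1, p.2))) =
      feature_set.flatMap (fun s => pvEvs s.toList) := by
  refine List.flatMap_congr ?_
  intro s _
  rw [pvRunsB_eq, List.map_map]
  rfl

-- A's outer fold over all sequences = three tally folds over the concatenated events
theorem pvFoldA_all (fs : List String)
    (st : PySem.Dict Int Int × PySem.Dict Int Int × PySem.Dict Int Int) :
    fs.foldl pvSeqA st =
      ((fs.flatMap (fun s => pvEvs s.toList)).foldl (pvStepB 'h') st.1,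
       (fs.flatMap (fun s => pvEvs s.toList)).foldl (pvStepB 'e') st.2.1,
       (fs.flatMap (fun s => pvEvs s.toList)).foldl (pvStepB '_') st.2.2) := by
  induction fs generalizing st with
  | nil => simp
  | cons s rest ih =>
    simp only [List.foldl_cons, List.flatMap_cons, List.foldl_append]
    rw [pvSeqA, pvFoldA_ev _ (pvRuns_const s.toList) st, ih]
    rfl

-- ===== VERDICT (by name: the statement is the Claim_ definition above) =====
theorem generate_length_spec : Claim_equal_generate_length := by
  intro feature_set _
  unfold Spec_generate_length generate_length generate_length_alt
  rw [pvEvents_eq, pvFoldA_all]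
  rfl
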